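-- pv_equiv track=rewrite | github.com/Fondamenti18/fondamenti-di-programmazione | students/1757075/homework02/program02.py | calcola2
-- ===== SOURCE A (Python) =====
-- def calcola2(insi, diz):
--     ''' metodo che calcola per ogni comp nell'insieme i compiti a cui e' subordinato '''
--     ris = {}                                # risultato
--     # per ogni compito nell'insieme
--     for comp in insi:
--         num = comp                          # varibile numero su cui lavorare
--         ls = []                             # lista compiti sub
--
--         # finche' ci sono comp sub
--         while True:
--             # se il compito cercato e' nel diz
--             if num in diz:
--                 # se e' primario fine ricerca
--                 if diz.get(num) == []:
--                     ls.reverse()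
--                     ris[comp] = ls # associo compito iniziale a risultato di ls
--                     break
--                 else:
--                     ls.append(diz.get(num)[0]) # aggiungo compito a cui e' subordinato a lista
--                     num = diz.get(num)[0]   # il numero su cui lavorare e'
--                                             # uguale al compito a cui era subordinato
--             else:
--                 break
--     return ris
-- ===== SOURCE B (Python) =====
-- def calcola2(insi, diz):
--     ''' metodo che calcola per ogni comp nell'insieme i compiti a cui e' subordinato '''
--     memo = {}  # n -> ancestor chain (root first), or None if the chain leaves diz
--
--     def chain(n):
--         cur = n
--         stack = []
--         # descend until a node with a known answer (memoized, primary, or missing)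
--         while cur not in memo:
--             v = diz.get(cur)
--             if v is None:
--                 memo[cur] = None
--             elif v == []:
--                 memo[cur] = []
--             else:
--                 stack.append(cur)
--                 cur = v[0]
--                 continue
--             break
--         # unwind: each pending node's chain is its parent's chain plus the parent
--         while stack:
--             m = stack.pop()
--             p = diz[m][0]
--             c = memo[p]
--             memo[m] = None if c is None else c + [p]
--         return memo[n]
--
--     ris = {}
--     for comp in insi:
--         c = chain(comp)
--         if c is not None:
--             ris[comp] = c
--     return ris
-- ===== Notes on version B (the rewrite author's own statement) =====
-- stated objective: alternative
-- what changed: A re-walks the whole parent chain to the root separately for every element; B computes each chain once with a shared memo table, descending with an explicit stack and filling chains on unwind (chain(n) = chain(parent) + [parent]), so shared ancestor suffixes are never re-traversed.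
import Mathlib
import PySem

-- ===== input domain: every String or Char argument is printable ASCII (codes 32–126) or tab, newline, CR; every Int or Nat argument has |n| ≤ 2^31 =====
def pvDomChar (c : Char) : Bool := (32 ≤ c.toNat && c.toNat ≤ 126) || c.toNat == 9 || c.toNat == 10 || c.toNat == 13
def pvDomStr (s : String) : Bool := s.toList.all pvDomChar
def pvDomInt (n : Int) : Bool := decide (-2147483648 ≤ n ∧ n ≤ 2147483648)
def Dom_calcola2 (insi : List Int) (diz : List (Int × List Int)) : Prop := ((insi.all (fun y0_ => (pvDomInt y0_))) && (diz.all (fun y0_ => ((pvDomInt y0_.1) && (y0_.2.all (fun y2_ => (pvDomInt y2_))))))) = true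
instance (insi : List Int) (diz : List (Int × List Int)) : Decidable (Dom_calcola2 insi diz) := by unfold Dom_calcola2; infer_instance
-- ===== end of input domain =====

-- B memoizes ancestor chains (chain(n) = chain(parent) + [parent]) instead of A's per-element
-- re-walk of the whole chain; equivalence of the RETURN value on inputs where A terminates.

-- ===== PORT A =====
-- the 'while True' loop of A; fuel only makes it total (Python diverges on parent cycles,
-- which Pre_calcola2 excludes); returns none where A records no entry for comp
def calcA_loop (d : PySem.Dict Int (List Int)) : Nat → Int → List Int → Option (List Int)
  | 0, _, _ => none
  | f+1, num, ls =>
    match d.get? num with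
    | none => none
    | some [] => some ls.reverse
    | some (p :: _) => calcA_loop d f p (ls ++ [p])

def calcola2 (insi : List Int) (diz : List (Int × List Int)) : List (Int × List Int) :=
  let d := PySem.Dict.mk diz
  (insi.foldl (fun ris comp =>
      match calcA_loop d (diz.length + 1) comp [] with
      | none => ris
      | some l => ris.insert comp l) PySem.Dict.empty).items

-- ===== PORT B =====
-- Source B's iterative memoized chain: descend pushing pending nodes, then unwind the stack;
-- fuel only totalizes the descent loop (Python diverges on cycles, excluded by Pre_calcola2)
def chainPh1 (d : PySem.Dict Int (List Int)) :
    Nat → PySem.Dict Int (Option (List Int)) → Int → List Int →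
    PySem.Dict Int (Option (List Int)) × List Int
  | 0, memo, _, stack => (memo, stack)
  | f+1, memo, cur, stack =>
    match memo.get? cur with
    | some _ => (memo, stack)
    | none =>
      match d.get? cur with
      | none => (memo.insert cur none, stack)
      | some [] => (memo.insert cur (some []), stack)
      | some (p :: _) => chainPh1 d f memo p (stack ++ [cur])

-- one iteration of Source B's unwind loop; the two default branches are unreachable whenever the
-- Python returns (a pushed node has a nonempty diz entry and its parent is resolved first)
def chainUnwind (d : PySem.Dict Int (List Int))
    (memo : PySem.Dict Int (Option (List Int))) (m : Int) :
    PySem.Dict Int (Option (List Int)) :=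
  match d.get? m with
  | some (p :: _) =>
    match memo.get? p with
    | some c => memo.insert m (c.map (fun l => l ++ [p]))
    | none => memo.insert m none
  | _ => memo

-- Source B's chain(n): descend, unwind (stack.pop() = process in reverse push order), return memo[n]
def chainIt (d : PySem.Dict Int (List Int)) (fuel : Nat)
    (memo : PySem.Dict Int (Option (List Int))) (n : Int) :
    Option (List Int) × PySem.Dict Int (Option (List Int)) :=
  let r1 := chainPh1 d fuel memo n []
  let memo2 := r1.2.reverse.foldl (chainUnwind d) r1.1
  ((memo2.get? n).getD none, memo2)

def calcola2_alt (insi : List Int) (diz : List (Int × List Int)) : List (Int × List Int) :=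
  let d := PySem.Dict.mk diz
  ((insi.foldl (fun st comp =>
      let res := chainIt d (diz.length + 1) st.2 comp
      match res.1 with
      | none => (st.1, res.2)
      | some l => (st.1.insert comp l, res.2)) (PySem.Dict.empty, PySem.Dict.empty)).1).items

-- ===== PRECONDITION & SPEC =====
def pvNext (d : PySem.Dict Int (List Int)) (n : Int) : Int :=
  match d.get? n with | some (p :: _) => p | _ => n
def pvTerm (d : PySem.Dict Int (List Int)) (n : Int) : Bool :=
  match d.get? n with | some (_ :: _) => false | _ => true

-- Pre_ excludes exactly the inputs where some element's parent chain cycles: there the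
-- Python A loops forever (and B's recursion does not return either). A chain that
-- terminates does so within diz.length steps (its non-terminal nodes are distinct keys),
-- so this is termination itself, not a size bound.
def Pre_calcola2 (insi : List Int) (diz : List (Int × List Int)) : Prop :=
  ∀ comp ∈ insi, pvTerm (PySem.Dict.mk diz) ((pvNext (PySem.Dict.mk diz))^[diz.length] comp) = true
instance (insi : List Int) (diz : List (Int × List Int)) : Decidable (Pre_calcola2 insi diz) := by
  unfold Pre_calcola2; infer_instance

def pvWitness_calcola2 : List Int × (List (Int × List Int)) :=
  ([1, 2, 5], [(1, []), (2, [1]), (3, [2])])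

def Spec_calcola2 (insi : List Int) (diz : List (Int × List Int)) (out : List (Int × List Int)) : Prop := out = calcola2_alt insi diz
instance (insi : List Int) (diz : List (Int × List Int)) (out : List (Int × List Int)) : Decidable (Spec_calcola2 insi diz out) := by unfold Spec_calcola2; infer_instance

-- ===== CLAIM (what is proved, stated in full; the proofs are below) =====
def Claim_equal_calcola2 : Prop := ∀ (insi : List Int) (diz : List (Int × List Int)), Dom_calcola2 insi diz → Pre_calcola2 insi diz → Spec_calcola2 insi diz (calcola2 insi diz)

-- ===== LEMMAS AND PROOFS =====

-- reference chain (root first), fuel-bounded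
def pcRef (d : PySem.Dict Int (List Int)) : Nat → Int → Option (List Int)
  | 0, _ => none
  | f+1, n =>
    match d.get? n with
    | none => none
    | some [] => some []
    | some (p :: _) => (pcRef d f p).map (· ++ [p])

lemma pcRef_succ (d : PySem.Dict Int (List Int)) (f : Nat) (n : Int) :
    pcRef d (f+1) n =
      match d.get? n with
      | none => none
      | some [] => some []
      | some (p :: _) => (pcRef d f p).map (· ++ [p]) := rfl

lemma calcA_loop_eq_pcRef (d : PySem.Dict Int (List Int)) :
    ∀ (f : Nat) (num : Int) (ls : List Int),
      calcA_loop d f num ls = (pcRef d f num).map (· ++ ls.reverse) := by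
  intro f
  induction f with
  | zero => intro num ls; simp [calcA_loop, pcRef]
  | succ f ih =>
    intro num ls
    cases h : d.get? num with
    | none => simp [calcA_loop, pcRef, h]
    | some v =>
      cases v with
      | nil => simp [calcA_loop, pcRef, h]
      | cons p t =>
        simp only [calcA_loop, pcRef_succ, h]
        rw [ih p (ls ++ [p])]
        cases pcRef d f p <;> simp

lemma pcRef_stable (d : PySem.Dict Int (List Int)) :
    ∀ (e : Nat) (n : Int) (f g : Nat),
      pvTerm d ((pvNext d)^[e] n) = true → e < f → e < g →
      pcRef d f n = pcRef d g n := by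
  intro e
  induction e with
  | zero =>
    intro n f g hterm hf hg
    obtain ⟨f', rfl⟩ := Nat.exists_eq_succ_of_ne_zero (Nat.pos_iff_ne_zero.mp hf)
    obtain ⟨g', rfl⟩ := Nat.exists_eq_succ_of_ne_zero (Nat.pos_iff_ne_zero.mp hg)
    simp only [Function.iterate_zero, id_eq, pvTerm] at hterm
    cases h : d.get? n with
    | none => simp [pcRef_succ, h]
    | some v =>
      cases v with
      | nil => simp [pcRef_succ, h]
      | cons p t => rw [h] at hterm; simp at hterm
  | succ e ih =>
    intro n f g hterm hf hg
    obtain ⟨f', rfl⟩ := Nat.exists_eq_succ_of_ne_zero (Nat.pos_iff_ne_zero.mp (Nat.lt_of_le_of_lt (Nat.zero_le _) hf))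
    obtain ⟨g', rfl⟩ := Nat.exists_eq_succ_of_ne_zero (Nat.pos_iff_ne_zero.mp (Nat.lt_of_le_of_lt (Nat.zero_le _) hg))
    cases h : d.get? n with
    | none => simp [pcRef_succ, h]
    | some v =>
      cases v with
      | nil => simp [pcRef_succ, h]
      | cons p t =>
        have hnext : pvNext d n = p := by simp [pvNext, h]
        rw [Function.iterate_succ_apply, hnext] at hterm
        simp only [pcRef_succ, h]
        rw [ih p f' g' hterm (Nat.lt_of_succ_lt_succ hf) (Nat.lt_of_succ_lt_succ hg)]

-- memo correctness invariant
def MemoGood (d : PySem.Dict Int (List Int)) (L : Nat)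
    (memo : PySem.Dict Int (Option (List Int))) : Prop :=
  ∀ n r, memo.get? n = some r → r = pcRef d L n

lemma memoGood_empty (d : PySem.Dict Int (List Int)) (L : Nat) :
    MemoGood d L PySem.Dict.empty := by
  intro n r h
  simp [PySem.Dict.get?_empty] at h

lemma memoGood_insert (d : PySem.Dict Int (List Int)) (L : Nat)
    (memo : PySem.Dict Int (Option (List Int))) (n : Int) (r : Option (List Int))
    (hm : MemoGood d L memo) (hr : r = pcRef d L n) :
    MemoGood d L (memo.insert n r) := by
  intro m s h
  rw [PySem.Dict.get?_insert] at h
  split at h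
  · next heq => subst heq; injection h with h'; subst h'; exact hr
  · exact hm m s h

lemma chainPh1_succ (d : PySem.Dict Int (List Int)) (f : Nat)
    (memo : PySem.Dict Int (Option (List Int))) (cur : Int) (stack : List Int) :
    chainPh1 d (f+1) memo cur stack =
      match memo.get? cur with
      | some _ => (memo, stack)
      | none =>
        match d.get? cur with
        | none => (memo.insert cur none, stack)
        | some [] => (memo.insert cur (some []), stack)
        | some (p :: _) => chainPh1 d f memo p (stack ++ [cur]) := rfl

-- phase 1 only appends to the stack: the incoming stack is a passive prefix
lemma chainPh1_stack (d : PySem.Dict Int (List Int)) :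
    ∀ (f : Nat) (memo : PySem.Dict Int (Option (List Int))) (cur : Int) (s t : List Int),
      chainPh1 d f memo cur (s ++ t) =
        ((chainPh1 d f memo cur t).1, s ++ (chainPh1 d f memo cur t).2) := by
  intro f
  induction f with
  | zero => intro memo cur s t; rfl
  | succ f ih =>
    intro memo cur s t
    rw [chainPh1_succ, chainPh1_succ]
    cases hm : memo.get? cur with
    | some r => rfl
    | none =>
      cases h : d.get? cur with
      | none => rfl
      | some v =>
        cases v with
        | nil => rfl
        | cons p tl =>
          dsimp only
          rw [List.append_assoc, ih]

lemma chainUnwind_eq (d : PySem.Dict Int (List Int))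
    (memo : PySem.Dict Int (Option (List Int))) (m p : Int) (t : List Int)
    (c : Option (List Int)) (h : d.get? m = some (p :: t)) (hc : memo.get? p = some c) :
    chainUnwind d memo m = memo.insert m (c.map (fun l => l ++ [p])) := by
  simp only [chainUnwind, h, hc]

lemma chainIt_correct (d : PySem.Dict Int (List Int)) (L : Nat) (hL1 : 1 ≤ L) :
    ∀ (e : Nat) (cur : Int) (memo : PySem.Dict Int (Option (List Int))),
      e + 1 ≤ L → MemoGood d L memo → pvTerm d ((pvNext d)^[e] cur) = true →
      ((chainPh1 d (e+1) memo cur []).2.reverse.foldl (chainUnwind d)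
          (chainPh1 d (e+1) memo cur []).1).get? cur = some (pcRef d L cur) ∧
      MemoGood d L ((chainPh1 d (e+1) memo cur []).2.reverse.foldl (chainUnwind d)
          (chainPh1 d (e+1) memo cur []).1) := by
  intro e
  induction e with
  | zero =>
    intro cur memo _ hmemo hterm
    simp only [Function.iterate_zero, id_eq, pvTerm] at hterm
    obtain ⟨L', rfl⟩ := Nat.exists_eq_succ_of_ne_zero (Nat.pos_iff_ne_zero.mp hL1)
    rw [chainPh1_succ]
    cases hm : memo.get? cur with
    | some r =>
      simpa [hm] using ⟨hmemo cur r hm, hmemo⟩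
    | none =>
      cases h : d.get? cur with
      | none =>
        have hp : pcRef d (L'+1) cur = none := by simp [pcRef_succ, h]
        simp only [List.reverse_nil, List.foldl_nil]
        exact ⟨by rw [PySem.Dict.get?_insert_self, hp],
               memoGood_insert _ _ _ _ _ hmemo hp.symm⟩
      | some v =>
        cases v with
        | nil =>
          have hp : pcRef d (L'+1) cur = some [] := by simp [pcRef_succ, h]
          simp only [List.reverse_nil, List.foldl_nil]
          exact ⟨by rw [PySem.Dict.get?_insert_self, hp],
                 memoGood_insert _ _ _ _ _ hmemo hp.symm⟩
        | cons p t => rw [h] at hterm; simp at hterm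
  | succ e ih =>
    intro cur memo heL hmemo hterm
    obtain ⟨L', rfl⟩ := Nat.exists_eq_succ_of_ne_zero (Nat.pos_iff_ne_zero.mp hL1)
    rw [chainPh1_succ]
    cases hm : memo.get? cur with
    | some r =>
      simpa [hm] using ⟨hmemo cur r hm, hmemo⟩
    | none =>
      cases h : d.get? cur with
      | none =>
        have hp : pcRef d (L'+1) cur = none := by simp [pcRef_succ, h]
        simp only [List.reverse_nil, List.foldl_nil]
        exact ⟨by rw [PySem.Dict.get?_insert_self, hp],
               memoGood_insert _ _ _ _ _ hmemo hp.symm⟩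
      | some v =>
        cases v with
        | nil =>
          have hp : pcRef d (L'+1) cur = some [] := by simp [pcRef_succ, h]
          simp only [List.reverse_nil, List.foldl_nil]
          exact ⟨by rw [PySem.Dict.get?_insert_self, hp],
                 memoGood_insert _ _ _ _ _ hmemo hp.symm⟩
        | cons p t =>
          have hnext : pvNext d cur = p := by simp [pvNext, h]
          rw [Function.iterate_succ_apply, hnext] at hterm
          have heL' : e + 1 ≤ L' + 1 := Nat.le_of_succ_le heL
          obtain ⟨ih1, ih2⟩ := ih p memo heL' hmemo hterm
          have hsp : chainPh1 d (e+1) memo p ([] ++ [cur]) =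
              ((chainPh1 d (e+1) memo p []).1, [cur] ++ (chainPh1 d (e+1) memo p []).2) :=
            chainPh1_stack d (e+1) memo p [cur] []
          simp only [List.nil_append] at hsp
          simp only [List.nil_append]
          rw [hsp]
          simp only [List.reverse_cons, List.reverse_append, List.reverse_nil,
            List.nil_append, List.foldl_append, List.foldl_cons, List.foldl_nil]
          have hstab : pcRef d L' p = pcRef d (L'+1) p :=
            pcRef_stable d e p L' (L'+1) hterm
              (Nat.lt_of_succ_le (Nat.le_of_succ_le_succ heL)) (Nat.lt_of_succ_le heL')
          have hval : (pcRef d (L'+1) p).map (fun l => l ++ [p]) = pcRef d (L'+1) cur := by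
            rw [← hstab, pcRef_succ, h]
          have hunw := chainUnwind_eq d
              ((chainPh1 d (e+1) memo p []).2.reverse.foldl (chainUnwind d)
                (chainPh1 d (e+1) memo p []).1) cur p t _ h ih1
          rw [hval] at hunw
          rw [hunw]
          exact ⟨PySem.Dict.get?_insert_self _ _ _,
                 memoGood_insert _ _ _ _ _ ih2 rfl⟩

lemma fold_eq (d : PySem.Dict Int (List Int)) (k : Nat) :
    ∀ (l : List Int) (ris : PySem.Dict Int (List Int))
      (memo : PySem.Dict Int (Option (List Int))),
      MemoGood d (k+1) memo →
      (∀ comp ∈ l, pvTerm d ((pvNext d)^[k] comp) = true) →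
      (l.foldl (fun st comp =>
          let res := chainIt d (k+1) st.2 comp
          match res.1 with
          | none => (st.1, res.2)
          | some ll => (st.1.insert comp ll, res.2)) (ris, memo)).1
      = l.foldl (fun ris comp =>
          match calcA_loop d (k+1) comp [] with
          | none => ris
          | some ll => ris.insert comp ll) ris := by
  intro l
  induction l with
  | nil => intro ris memo _ _; rfl
  | cons comp rest ih =>
    intro ris memo hmemo hterm
    have ht : pvTerm d ((pvNext d)^[k] comp) = true := hterm comp (List.mem_cons_self ..)
    obtain ⟨h1, h2⟩ := chainIt_correct d (k+1) (Nat.succ_le_succ (Nat.zero_le _)) k comp memo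
      (Nat.le_refl _) hmemo ht
    have hA : calcA_loop d (k+1) comp [] = pcRef d (k+1) comp := by
      rw [calcA_loop_eq_pcRef]
      cases pcRef d (k+1) comp <;> simp
    have hres1 : (chainIt d (k+1) memo comp).1 = pcRef d (k+1) comp := by
      unfold chainIt
      dsimp only
      rw [h1]
      rfl
    have hres2 : MemoGood d (k+1) (chainIt d (k+1) memo comp).2 := h2
    simp only [List.foldl_cons]
    rw [hA, ← hres1]
    cases hc : (chainIt d (k+1) memo comp).1 with
    | none =>
      exact ih ris _ hres2 (fun c hc' => hterm c (List.mem_cons_of_mem _ hc'))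
    | some ll =>
      exact ih _ _ hres2 (fun c hc' => hterm c (List.mem_cons_of_mem _ hc'))

-- ===== VERDICT (by name: the statement is the Claim_ definition above) =====
theorem calcola2_spec : Claim_equal_calcola2 := by
  intro insi diz _ hpre
  unfold Spec_calcola2 calcola2 calcola2_alt
  have := fold_eq (PySem.Dict.mk diz) diz.length insi
    PySem.Dict.empty PySem.Dict.empty (memoGood_empty _ _) hpre
  simp only at this ⊢
  rw [this]
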